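-- pv_equiv track=rewrite | github.com/carevealed/PBCore | PBCore/scripts/pbcore_csv.py | _group_tapes
-- ===== SOURCE A (Python) =====
-- def _group_tapes(parts, files=None):
--     # print "parts: " + str(parts)
--     organized = []
--     multi = []
--     single = []
--     for part in parts:
--         if "_t" in part:
--             if "_a" in part:
--                 raise Exception("PLEASE BRING THIS EXAMPLE TO HENRY! HE'S BEEN LOOKING FOR ONE TO FIX THIS SHORTCOMING!")
--             else:
--                 single = [part]
--             organized.append(single)
--         else:
--             single = parts
--             organized.append(single)
--             break
--     return organized
-- ===== SOURCE B (Python) =====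
-- def _group_tapes(parts, files=None):
--     # Recursive decomposition: consume the list head-first, building the
--     # result front-to-back by cons, instead of an accumulator loop with break.
--     def go(rest):
--         if not rest:
--             return []
--         head = rest[0]
--         if "_t" not in head:
--             return [parts]
--         if "_a" in head:
--             raise Exception("PLEASE BRING THIS EXAMPLE TO HENRY! HE'S BEEN LOOKING FOR ONE TO FIX THIS SHORTCOMING!")
--         return [[head]] + go(rest[1:])
--     return go(parts)
-- ===== Notes on version B (the rewrite author's own statement) =====
-- stated objective: alternative
-- what changed: B replaces A's iterative loop with a mutable organized/single/multi accumulator state and a break by a pure structural recursion that builds the grouped list front-to-back by cons, returning [parts] as the recursion's base at the first non-'_t' part.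
import Mathlib
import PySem

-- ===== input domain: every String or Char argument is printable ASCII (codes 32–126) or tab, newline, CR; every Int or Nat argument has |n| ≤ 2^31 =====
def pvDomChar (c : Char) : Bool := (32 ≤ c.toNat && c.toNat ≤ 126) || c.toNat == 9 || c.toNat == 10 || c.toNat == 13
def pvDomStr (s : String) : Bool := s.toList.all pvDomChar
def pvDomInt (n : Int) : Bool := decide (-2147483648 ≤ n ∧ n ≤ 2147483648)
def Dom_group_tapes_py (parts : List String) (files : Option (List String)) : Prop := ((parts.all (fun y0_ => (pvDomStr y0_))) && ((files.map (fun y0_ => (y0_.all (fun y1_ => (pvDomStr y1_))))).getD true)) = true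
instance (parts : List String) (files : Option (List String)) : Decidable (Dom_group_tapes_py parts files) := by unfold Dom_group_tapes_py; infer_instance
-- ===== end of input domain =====

-- B replaces A's accumulator loop with break by a pure structural recursion building the
-- result front-to-back by cons: an alternative decomposition of the same task.


-- shared helpers: the two membership tests '"_t" in part' and '"_a" in part'
def hasT (p : String) : Bool := PySem.Str.isIn "_t" p
def hasA (p : String) : Bool := PySem.Str.isIn "_a" p

-- ===== PORT A =====
-- A's for-loop with its `organized` accumulator and `break`; the raise branch is
-- unreachable under Pre_ (it returns the accumulator there, a dummy).
def groupTapesLoopA (parts : List String) (organized : List (List String)) : List String → List (List String)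
  | [] => organized
  | part :: rest =>
    if hasT part then
      if hasA part then organized  -- raise Exception(...): excluded by Pre_
      else groupTapesLoopA parts (organized ++ [[part]]) rest
    else organized ++ [parts]  -- break after appending the whole list

def group_tapes_py (parts : List String) (files : Option (List String)) : List (List String) :=
  groupTapesLoopA parts [] parts

-- ===== PORT B =====
-- Source B's inner recursive `go`: cons-builds the result; base [parts] at the first
-- non-"_t" head; the raise branch is unreachable under Pre_ (dummy []).
def goB (parts : List String) : List String → List (List String)
  | [] => []
  | head :: rest =>
    if !hasT head then [parts]
    else if hasA head then []  -- raise Exception(...): excluded by Pre_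
    else [head] :: goB parts rest

def group_tapes_py_alt (parts : List String) (files : Option (List String)) : List (List String) :=
  goB parts parts

-- ===== PRECONDITION & SPEC =====
-- Pre_ excludes exactly the inputs on which A raises its Exception: a part containing
-- "_a" inside the leading run of parts containing "_t" (B raises there too).
def Pre_group_tapes_py (parts : List String) (files : Option (List String)) : Prop :=
  (parts.takeWhile (fun p => hasT p)).all (fun p => !(hasA p)) = true

instance (parts : List String) (files : Option (List String)) : Decidable (Pre_group_tapes_py parts files) := by
  unfold Pre_group_tapes_py; infer_instance

def pvWitness_group_tapes_py : List String × Option (List String) := (["x_t1", "x_t2", "y"], none)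

def Spec_group_tapes_py (parts : List String) (files : Option (List String)) (out : List (List String)) : Prop := out = group_tapes_py_alt parts files
instance (parts : List String) (files : Option (List String)) (out : List (List String)) : Decidable (Spec_group_tapes_py parts files out) := by unfold Spec_group_tapes_py; infer_instance

-- ===== CLAIM (what is proved, stated in full; the proofs are below) =====
def Claim_equal_group_tapes_py : Prop := ∀ (parts : List String) (files : Option (List String)), Dom_group_tapes_py parts files → Pre_group_tapes_py parts files → Spec_group_tapes_py parts files (group_tapes_py parts files)

-- ===== LEMMAS AND PROOFS =====

-- A's loop run on a suffix l whose leading "_t" run is "_a"-free appends exactly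
-- B's recursion on l to the accumulator.
theorem loopA_eq_goB (parts : List String) :
    ∀ (l : List String) (organized : List (List String)),
      (l.takeWhile (fun p => hasT p)).all (fun p => !(hasA p)) = true →
      groupTapesLoopA parts organized l = organized ++ goB parts l := by
  intro l
  induction l with
  | nil => intro organized _; simp [groupTapesLoopA, goB]
  | cons p rest ih =>
    intro organized hpre
    by_cases ht : hasT p
    · have hsp : (((p :: rest).takeWhile (fun p => hasT p)).all fun p => !hasA p) = true := hpre
      simp [List.takeWhile_cons, ht] at hsp
      have ha : hasA p = false := by simpa using hsp.1
      have hrest : (rest.takeWhile (fun p => hasT p)).all (fun p => !(hasA p)) = true := by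
        simpa using hsp.2
      simp only [groupTapesLoopA, goB, ht, ha, Bool.not_true, Bool.false_eq_true, if_false,
        if_true, ite_false]
      rw [ih _ hrest]
      simp
    · have ht' : hasT p = false := by simpa using ht
      simp [groupTapesLoopA, goB, ht']

-- ===== VERDICT (by name: the statement is the Claim_ definition above) =====
theorem group_tapes_py_spec : Claim_equal_group_tapes_py := by
  intro parts files _ hpre
  unfold Spec_group_tapes_py group_tapes_py group_tapes_py_alt
  rw [loopA_eq_goB parts parts [] hpre]
  simp
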